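-- pv_equiv track=rewrite | github.com/HarryZhu10/hzhu30 | 03_py/Warmup1/front3.py | front3
-- ===== SOURCE A (Python) =====
-- def front3(str):
--   if len(str) >= 3:
--     str = str[0:3]
--     for i in range(2):
--       str += str[0:3]
--   else:
--     x = len(str)
--     for i in range(2):
--       str += str[0:x]
--   return str
-- ===== SOURCE B (Python) =====
-- def front3(str):
--   return str[:3] * 3
-- ===== Notes on version B (the rewrite author's own statement) =====
-- stated objective: simpler
-- what changed: Replaced the length-branch plus 2-iteration accumulation loop with the single closed-form expression str[:3] * 3, which covers strings shorter than 3 as well.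
import Mathlib
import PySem

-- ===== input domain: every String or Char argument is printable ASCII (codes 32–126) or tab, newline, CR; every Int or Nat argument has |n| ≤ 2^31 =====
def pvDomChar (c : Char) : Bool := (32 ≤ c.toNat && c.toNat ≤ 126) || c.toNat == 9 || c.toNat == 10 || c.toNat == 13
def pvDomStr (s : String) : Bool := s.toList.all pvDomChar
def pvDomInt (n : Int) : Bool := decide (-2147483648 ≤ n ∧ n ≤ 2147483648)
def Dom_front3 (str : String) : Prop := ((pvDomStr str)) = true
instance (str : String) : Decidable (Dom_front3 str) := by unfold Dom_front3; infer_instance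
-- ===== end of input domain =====

-- B replaces A's branch-and-loop structure with the closed form str[:3] * 3 (simpler).

-- ===== PORT A =====
-- literal port of A on the List Char side: branch on len, then the 2-iteration += loop
def front3 (str : String) : String :=
  let cs := str.toList
  if 3 ≤ cs.length then
    let cs := PySem.List.slice cs (some 0) (some 3)
    String.ofList ((PySem.List.pyRange 0 2 1).foldl
      (fun s _ => s ++ PySem.List.slice s (some 0) (some 3)) cs)
  else
    let x : Int := (cs.length : Int)
    String.ofList ((PySem.List.pyRange 0 2 1).foldl
      (fun s _ => s ++ PySem.List.slice s (some 0) (some x)) cs)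

-- ===== PORT B =====
def front3_alt (str : String) : String :=
  let t := PySem.List.slice str.toList none (some 3)
  String.ofList (t ++ t ++ t)

-- ===== PRECONDITION & SPEC =====
def Spec_front3 (str : String) (out : String) : Prop := out = front3_alt str
instance (str : String) (out : String) : Decidable (Spec_front3 str out) := by unfold Spec_front3; infer_instance

-- ===== CLAIM (what is proved, stated in full; the proofs are below) =====
def Claim_equal_front3 : Prop := ∀ (str : String), Dom_front3 str → Spec_front3 str (front3 str)

-- ===== LEMMAS AND PROOFS =====

-- the 2-iteration loop unrolled: range(0,2) = [0,1]
theorem pvRange02 : PySem.List.pyRange 0 2 1 = [0, 1] := by decide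

-- ===== VERDICT (by name: the statement is the Claim_ definition above) =====
theorem front3_spec : Claim_equal_front3 := by
  intro str _
  unfold Spec_front3 front3 front3_alt
  rw [pvRange02]
  simp only [List.foldl]
  by_cases h : 3 ≤ str.toList.length
  · rw [if_pos h]
    have e0 : PySem.List.slice str.toList (some 0) (some 3) = str.toList.take 3 := by
      simp [pysem]
    set t := str.toList.take 3 with ht
    have hlt : t.length = 3 := by rw [ht, List.length_take]; omega
    have e1 : PySem.List.slice t (some 0) (some 3) = t := by
      have : t.take 3 = t := List.take_of_length_le (by omega)
      simp [pysem, this]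
    have e2 : PySem.List.slice (t ++ t) (some 0) (some 3) = t := by
      have : (t ++ t).take 3 = t := by
        rw [List.take_append_of_le_length (by omega)]
        exact List.take_of_length_le (by omega)
      simp [pysem, this]
    have e3 : PySem.List.slice str.toList none (some 3) = t := by
      rw [ht]; simp [pysem]
    rw [e0, e1, e2, e3, List.append_assoc]
  · rw [if_neg h]
    have hc : str.toList.take str.toList.length = str.toList := List.take_length
    have e0 : PySem.List.slice str.toList (some 0) (some ((str.toList.length : Nat) : Int)) = str.toList := by
      simp [pysem]
    have e1 : PySem.List.slice (str.toList ++ str.toList) (some 0) (some ((str.toList.length : Nat) : Int)) = str.toList := by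
      simp [pysem]
    have e3 : PySem.List.slice str.toList none (some 3) = str.toList := by
      have : str.toList.take 3 = str.toList := List.take_of_length_le (by omega)
      simp [pysem, this]
    rw [e0, e1, e3, List.append_assoc]
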